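-- pv_equiv track=rewrite | github.com/EdgeLake/EdgeLake | edge_lake/generic/utils_data.py | get_length_for_dictionary
-- ===== SOURCE A (Python) =====
-- def get_length_for_dictionary(source_str: str, offset: int):
--     i = 0
--     for char in source_str[offset:]:
--
--         if (char >= 'a' and char <= 'z') or (char >= 'A' and char <= 'Z'):
--             i += 1
--             continue
--         if char == '_' or char == '-' or char == '@':
--             i += 1
--             continue
--         if i == 0 and char == '!':
--             i += 1
--             continue  # firs char is !
--
--         break
--
--     return i
-- ===== SOURCE B (Python) =====
-- import re
--
-- # Anchored regex: optional leading '!' (only at the very start), then any run of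
-- # identifier characters; the match length is the answer.
-- _IDENT_RE = re.compile(r'!?[a-zA-Z_@\-]*')
--
--
-- def get_length_for_dictionary(source_str: str, offset: int):
--     return len(_IDENT_RE.match(source_str[offset:]).group(0))
-- ===== Notes on version B (the rewrite author's own statement) =====
-- stated objective: idiomatic
-- what changed: Replaced A's explicit character-by-character counting loop (with break and an i==0 special case for '!') by a single anchored regex match r'!?[a-zA-Z_@\-]*' on source_str[offset:] whose match length is the answer (measured faster: the scan runs inside the C regex engine instead of a Python-level loop).
import Mathlib
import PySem

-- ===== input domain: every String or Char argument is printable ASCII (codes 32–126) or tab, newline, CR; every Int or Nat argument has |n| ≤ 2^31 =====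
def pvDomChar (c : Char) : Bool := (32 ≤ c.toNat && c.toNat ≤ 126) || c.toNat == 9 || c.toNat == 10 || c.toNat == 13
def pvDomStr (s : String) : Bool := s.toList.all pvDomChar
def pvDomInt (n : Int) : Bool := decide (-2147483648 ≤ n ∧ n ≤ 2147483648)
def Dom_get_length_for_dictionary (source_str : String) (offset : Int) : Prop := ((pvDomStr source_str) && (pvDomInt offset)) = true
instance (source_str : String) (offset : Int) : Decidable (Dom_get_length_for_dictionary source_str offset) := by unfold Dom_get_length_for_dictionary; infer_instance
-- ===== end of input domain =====

-- B replaces A's explicit per-character counting loop by one anchored regex match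
-- '!?[a-zA-Z_@\-]*' on the slice; objective: idiomatic.


-- ===== PORT A =====
-- the for-loop over source_str[offset:] with its break, state i
def pvLoopA : List Char → Int → Int
  | [], i => i
  | c :: rest, i =>
    if ('a' ≤ c ∧ c ≤ 'z') ∨ ('A' ≤ c ∧ c ≤ 'Z') then pvLoopA rest (i + 1)
    else if c = '_' ∨ c = '-' ∨ c = '@' then pvLoopA rest (i + 1)
    else if i = 0 ∧ c = '!' then pvLoopA rest (i + 1)
    else i

def get_length_for_dictionary (source_str : String) (offset : Int) : Int :=
  pvLoopA (PySem.List.slice source_str.toList (some offset) none) 0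

-- ===== PORT B =====
-- the character class [a-zA-Z_@\-] of the regex (exact)
def pvReClass (c : Char) : Bool :=
  ('a' ≤ c && c ≤ 'z') || ('A' ≤ c && c ≤ 'Z') || c == '_' || c == '@' || c == '-'

-- re.match(r'!?[a-zA-Z_@\-]*', s).group(0): the anchored greedy match — the optional
-- '!' consumed iff the string starts with '!', then the longest run of class chars
-- (ported by hand, exact for this regex: both pieces are greedy and cannot backtrack)
def pvReMatch (s : List Char) : List Char :=
  match s with
  | '!' :: rest => '!' :: rest.takeWhile pvReClass
  | _ => s.takeWhile pvReClass

def get_length_for_dictionary_alt (source_str : String) (offset : Int) : Int :=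
  ((pvReMatch (PySem.List.slice source_str.toList (some offset) none)).length : Int)

-- ===== PRECONDITION & SPEC =====
def Spec_get_length_for_dictionary (source_str : String) (offset : Int) (out : Int) : Prop := out = get_length_for_dictionary_alt source_str offset
instance (source_str : String) (offset : Int) (out : Int) : Decidable (Spec_get_length_for_dictionary source_str offset out) := by unfold Spec_get_length_for_dictionary; infer_instance

-- ===== CLAIM (what is proved, stated in full; the proofs are below) =====
def Claim_equal_get_length_for_dictionary : Prop := ∀ (source_str : String) (offset : Int), Dom_get_length_for_dictionary source_str offset → Spec_get_length_for_dictionary source_str offset (get_length_for_dictionary source_str offset)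

-- ===== LEMMAS AND PROOFS =====

-- the regex class holds exactly on A's accepted characters
theorem pvClassIff (c : Char) :
    pvReClass c = true ↔ ((('a' ≤ c ∧ c ≤ 'z') ∨ ('A' ≤ c ∧ c ≤ 'Z')) ∨ (c = '_' ∨ c = '-' ∨ c = '@')) := by
  unfold pvReClass
  simp only [Bool.or_eq_true, decide_eq_true_eq, beq_iff_eq, Bool.and_eq_true]
  tauto

-- once i ≥ 1 the '!' branch is dead and A's loop counts the takeWhile run
theorem pvLoopA_pos (l : List Char) : ∀ (i : Int), 1 ≤ i →
    pvLoopA l i = i + ((l.takeWhile pvReClass).length : Int) := by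
  induction l with
  | nil => intro i _; simp [pvLoopA]
  | cons c rest ih =>
    intro i hi
    by_cases hc : pvReClass c = true
    · have hcond := (pvClassIff c).mp hc
      have hrec : pvLoopA (c :: rest) i = pvLoopA rest (i + 1) := by
        rcases hcond with h | h <;> simp [pvLoopA, h]
      rw [hrec, ih (i + 1) (by omega), List.takeWhile_cons_of_pos hc]
      simp; omega
    · have hn1 : ¬ (('a' ≤ c ∧ c ≤ 'z') ∨ ('A' ≤ c ∧ c ≤ 'Z')) := fun h => hc ((pvClassIff c).mpr (Or.inl h))
      have hn2 : ¬ (c = '_' ∨ c = '-' ∨ c = '@') := fun h => hc ((pvClassIff c).mpr (Or.inr h))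
      have : pvLoopA (c :: rest) i = i := by
        simp only [pvLoopA, if_neg hn1, if_neg hn2]
        have : ¬ (i = 0 ∧ c = '!') := by rintro ⟨h, _⟩; omega
        simp [this]
      rw [this, List.takeWhile_cons_of_neg hc]
      simp

-- pvReMatch on a non-'!' head is the plain takeWhile run
theorem pvReMatch_not_bang (c : Char) (rest : List Char) (h : c ≠ '!') :
    pvReMatch (c :: rest) = (c :: rest).takeWhile pvReClass := by
  unfold pvReMatch
  split
  · rename_i heq
    injection heq with h1 _
    exact absurd h1 h
  · rfl

-- the heart: A's loop from 0 equals the regex-match length, for any char list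
theorem pvMain (s : List Char) : pvLoopA s 0 = ((pvReMatch s).length : Int) := by
  cases s with
  | nil => simp [pvLoopA, pvReMatch]
  | cons c rest =>
    by_cases hc : pvReClass c = true
    · have hcond := (pvClassIff c).mp hc
      have hne : c ≠ '!' := by
        intro h; subst h; exact absurd hc (by decide)
      have hrec : pvLoopA (c :: rest) 0 = pvLoopA rest 1 := by
        rcases hcond with h | h <;> simp [pvLoopA, h]
      rw [hrec, pvLoopA_pos rest 1 (by omega), pvReMatch_not_bang c rest hne,
        List.takeWhile_cons_of_pos hc]
      simp; omega
    · have hn1 : ¬ (('a' ≤ c ∧ c ≤ 'z') ∨ ('A' ≤ c ∧ c ≤ 'Z')) := fun h => hc ((pvClassIff c).mpr (Or.inl h))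
      have hn2 : ¬ (c = '_' ∨ c = '-' ∨ c = '@') := fun h => hc ((pvClassIff c).mpr (Or.inr h))
      by_cases hb : c = '!'
      · subst hb
        have : pvLoopA ('!' :: rest) 0 = pvLoopA rest 1 := by
          simp only [pvLoopA, if_neg hn1, if_neg hn2]
          simp
        rw [this, pvLoopA_pos rest 1 (by omega)]
        show _ = (((pvReMatch ('!' :: rest)).length : Nat) : Int)
        have hm : pvReMatch ('!' :: rest) = '!' :: rest.takeWhile pvReClass := rfl
        rw [hm]; simp; omega
      · have hA : pvLoopA (c :: rest) 0 = 0 := by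
          simp only [pvLoopA, if_neg hn1, if_neg hn2]
          simp [hb]
        rw [hA, pvReMatch_not_bang c rest hb, List.takeWhile_cons_of_neg hc]
        simp

-- ===== VERDICT (by name: the statement is the Claim_ definition above) =====
theorem get_length_for_dictionary_spec : Claim_equal_get_length_for_dictionary := by
  intro source_str offset _
  unfold Spec_get_length_for_dictionary get_length_for_dictionary get_length_for_dictionary_alt
  exact pvMain _
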